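-- pv_equiv track=rewrite | github.com/dillida-cmd/Threatintell | sandbox_service.py | _parse_section_characteristics
-- ===== SOURCE A (Python) =====
-- from typing import Dict, List, Optional, Tuple, Any
--
-- def _parse_section_characteristics(chars: int) -> List[str]:
--     """Parse section characteristics"""
--     flags = []
--     char_map = {
--         0x00000020: 'CODE',
--         0x00000040: 'INITIALIZED_DATA',
--         0x00000080: 'UNINITIALIZED_DATA',
--         0x02000000: 'DISCARDABLE',
--         0x04000000: 'NOT_CACHED',
--         0x08000000: 'NOT_PAGED',
--         0x10000000: 'SHARED',
--         0x20000000: 'EXECUTE',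
--         0x40000000: 'READ',
--         0x80000000: 'WRITE',
--     }
--     for flag, name in char_map.items():
--         if chars & flag:
--             flags.append(name)
--     return flags
-- ===== SOURCE B (Python) =====
-- from typing import List
--
-- _CHAR_NAMES = {
--     0x00000020: 'CODE',
--     0x00000040: 'INITIALIZED_DATA',
--     0x00000080: 'UNINITIALIZED_DATA',
--     0x02000000: 'DISCARDABLE',
--     0x04000000: 'NOT_CACHED',
--     0x08000000: 'NOT_PAGED',
--     0x10000000: 'SHARED',
--     0x20000000: 'EXECUTE',
--     0x40000000: 'READ',
--     0x80000000: 'WRITE',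
-- }
--
-- _MASK = 0xFE0000E0  # union of all known flag bits
--
--
-- def _parse_section_characteristics(chars: int) -> List[str]:
--     """Parse section characteristics"""
--     flags = []
--     m = chars & _MASK
--     while m:
--         b = m & -m          # lowest set bit; bits come out in ascending order
--         flags.append(_CHAR_NAMES[b])
--         m ^= b
--     return flags
-- ===== Notes on version B (the rewrite author's own statement) =====
-- stated objective: alternative
-- what changed: B masks chars with the union of all flag bits once and then extracts the set bits lowest-first (b = m & -m; m ^= b), looking each bit up in the table, instead of scanning the whole table and testing every flag against chars.
import Mathlib
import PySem

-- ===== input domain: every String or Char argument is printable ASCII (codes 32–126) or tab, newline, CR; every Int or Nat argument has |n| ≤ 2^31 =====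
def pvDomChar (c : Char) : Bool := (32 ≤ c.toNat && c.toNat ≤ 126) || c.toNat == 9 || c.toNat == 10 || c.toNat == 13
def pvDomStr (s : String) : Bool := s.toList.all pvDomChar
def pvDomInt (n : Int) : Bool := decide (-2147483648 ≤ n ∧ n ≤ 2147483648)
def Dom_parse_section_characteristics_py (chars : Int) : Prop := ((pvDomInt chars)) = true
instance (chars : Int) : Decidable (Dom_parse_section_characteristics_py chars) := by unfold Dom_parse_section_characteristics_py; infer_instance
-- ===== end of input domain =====

-- B re-implements the flag decoding by extracting the set bits of `chars & MASK` lowest-first and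
-- looking each bit up in the table, instead of scanning the whole table and testing every flag
-- against `chars` (objective: alternative decomposition, same cost).

-- ===== PORT A =====
-- char_map: a dict literal with distinct keys, iterated via .items() in insertion order
def charMapA : PySem.Dict Int String := PySem.Dict.ofList
  [(0x00000020, "CODE"),
   (0x00000040, "INITIALIZED_DATA"),
   (0x00000080, "UNINITIALIZED_DATA"),
   (0x02000000, "DISCARDABLE"),
   (0x04000000, "NOT_CACHED"),
   (0x08000000, "NOT_PAGED"),
   (0x10000000, "SHARED"),
   (0x20000000, "EXECUTE"),
   (0x40000000, "READ"),
   (0x80000000, "WRITE")]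

def parse_section_characteristics_py (chars : Int) : List String :=
  charMapA.items.foldl
    (fun flags fn => if PySem.Int.band chars fn.1 ≠ 0 then flags ++ [fn.2] else flags) []

-- ===== PORT B =====
def charNamesB : PySem.Dict Int String := PySem.Dict.ofList
  [(0x00000020, "CODE"),
   (0x00000040, "INITIALIZED_DATA"),
   (0x00000080, "UNINITIALIZED_DATA"),
   (0x02000000, "DISCARDABLE"),
   (0x04000000, "NOT_CACHED"),
   (0x08000000, "NOT_PAGED"),
   (0x10000000, "SHARED"),
   (0x20000000, "EXECUTE"),
   (0x40000000, "READ"),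
   (0x80000000, "WRITE")]

-- Source B's while-loop; fuel 32 suffices: m has at most 10 set bits and each pass clears one
def altLoopB : Nat → Int → List String → List String
  | 0, _, flags => flags
  | fuel + 1, m, flags =>
    if m ≠ 0 then
      let b := PySem.Int.band m (-m)
      match PySem.Dict.get? charNamesB b with
      | some name => altLoopB fuel (PySem.Int.bxor m b) (flags ++ [name])
      | none => flags   -- unreachable: every set bit of m ⊆ _MASK is a key of _NAMES (Python would raise KeyError)
    else flags

def parse_section_characteristics_py_alt (chars : Int) : List String :=
  altLoopB 32 (PySem.Int.band chars 0xFE0000E0) []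

-- ===== PRECONDITION & SPEC =====
def Spec_parse_section_characteristics_py (chars : Int) (out : List String) : Prop := out = parse_section_characteristics_py_alt chars
instance (chars : Int) (out : List String) : Decidable (Spec_parse_section_characteristics_py chars out) := by unfold Spec_parse_section_characteristics_py; infer_instance

-- ===== CLAIM (what is proved, stated in full; the proofs are below) =====
def Claim_equal_parse_section_characteristics_py : Prop := ∀ (chars : Int), Dom_parse_section_characteristics_py chars → Spec_parse_section_characteristics_py chars (parse_section_characteristics_py chars)

-- ===== LEMMAS AND PROOFS =====

theorem pv_bit_decomp (b : Nat) : Nat.bit (b.testBit 0) (b / 2) = b := by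
  simp [Nat.bit_val, Nat.testBit_zero]
  rcases Nat.mod_two_eq_zero_or_one b with h | h <;> simp [h] <;> omega

theorem pv_sub_and_eq_ldiff (a : Nat) : ∀ b : Nat, a - (a &&& b) = Nat.ldiff a b := by
  induction a using Nat.binaryRec with
  | zero => intro b; simp [Nat.ldiff]
  | bit c m IH =>
    intro b
    obtain ⟨d, n, rfl⟩ : ∃ d n, b = Nat.bit d n := ⟨b.testBit 0, b / 2, (pv_bit_decomp b).symm⟩
    rw [Nat.land_bit, Nat.ldiff_bit]
    have h1 := IH n
    have h2 : m &&& n ≤ m := Nat.and_le_left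
    cases c <;> cases d <;> simp [Nat.bit_val] <;> omega

theorem pv_testBit_mod32 (x j : Nat) : (x % 4294967296).testBit j = (decide (j < 32) && x.testBit j) := by
  have h := Nat.testBit_mod_two_pow x 32 j
  norm_num at h
  exact h

theorem pv_testBit_ones32 (j : Nat) : (4294967295 : Nat).testBit j = decide (j < 32) := by
  have h := Nat.testBit_two_pow_sub_one 32 j
  norm_num at h
  exact h

theorem pv_hiBit_false {f : Int} (hf0 : 0 ≤ f) (hf : f < 4294967296) {j : Nat} (hj : ¬ j < 32) :
    f.toNat.testBit j = false := by
  apply Nat.testBit_lt_two_pow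
  calc f.toNat < 2 ^ 32 := by omega
    _ ≤ 2 ^ j := Nat.pow_le_pow_right (by norm_num) (by omega)

-- Python's `c & f` for 0 ≤ f < 2^32 only reads the 32 low bits of c
theorem pv_band_emod32 (c f : Int) (hf0 : 0 ≤ f) (hf : f < 4294967296) :
    PySem.Int.band c f = (((c % 4294967296).toNat &&& f.toNat : Nat) : Int) := by
  by_cases hc : 0 ≤ c
  · rw [PySem.Int.band_of_nonneg hc hf0]
    congr 1
    apply Nat.eq_of_testBit_eq; intro j
    have he : (c % 4294967296).toNat = c.toNat % 4294967296 := by omega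
    rw [he, Nat.testBit_land, Nat.testBit_land, pv_testBit_mod32]
    by_cases hj : j < 32
    · simp [hj]
    · simp [hj, pv_hiBit_false hf0 hf hj]
  · simp only [PySem.Int.band]
    rw [if_neg hc, if_pos hf0, pv_sub_and_eq_ldiff]
    congr 1
    apply Nat.eq_of_testBit_eq; intro j
    rw [Nat.testBit_ldiff, Nat.testBit_land]
    have he : (c % 4294967296).toNat = 4294967295 - (-c - 1).toNat % 4294967296 := by omega
    rw [he]
    have h2 : (4294967295 : Nat) &&& ((-c - 1).toNat % 4294967296) = (-c - 1).toNat % 4294967296 := by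
      apply Nat.eq_of_testBit_eq; intro i
      rw [Nat.testBit_land, pv_testBit_ones32, pv_testBit_mod32]
      by_cases hi : i < 32 <;> simp [hi]
    have hx : (4294967295 : Nat) - (-c - 1).toNat % 4294967296
        = Nat.ldiff 4294967295 ((-c - 1).toNat % 4294967296) := by
      rw [← pv_sub_and_eq_ldiff, h2]
    rw [hx, Nat.testBit_ldiff, pv_testBit_ones32, pv_testBit_mod32]
    by_cases hj : j < 32
    · simp [hj, Bool.and_comm]
    · simp [hj, pv_hiBit_false hf0 hf hj]

theorem pv_band_flag (c : Int) (i : Nat) (hi : i < 32) :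
    PySem.Int.band c (2 ^ i) = ((((c % 4294967296).toNat.testBit i).toNat * 2 ^ i : Nat) : Int) := by
  have h2 : ((2 : Int) ^ i) = ((2 ^ i : Nat) : Int) := by push_cast; ring
  rw [pv_band_emod32 c (2 ^ i) (by positivity)
      (by rw [h2]; exact_mod_cast Nat.pow_lt_pow_right (by norm_num) hi),
    h2, Int.toNat_natCast, Nat.and_two_pow]

theorem pv_tb_mul_pow (b : Bool) (i j : Nat) :
    (b.toNat * 2 ^ i).testBit j = (b && decide (j = i)) := by
  cases b <;> simp [Nat.testBit_two_pow, eq_comm]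

theorem pv_and_mask (n : Nat) :
    n &&& 0xFE0000E0 =
      ((n.testBit 5).toNat * 2 ^ 5 ||| (n.testBit 6).toNat * 2 ^ 6 ||| (n.testBit 7).toNat * 2 ^ 7 |||
       (n.testBit 25).toNat * 2 ^ 25 ||| (n.testBit 26).toNat * 2 ^ 26 ||| (n.testBit 27).toNat * 2 ^ 27 |||
       (n.testBit 28).toNat * 2 ^ 28 ||| (n.testBit 29).toNat * 2 ^ 29 ||| (n.testBit 30).toNat * 2 ^ 30 |||
       (n.testBit 31).toNat * 2 ^ 31) := by
  have hm : (0xFE0000E0 : Nat) =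
      (2 ^ 5 ||| 2 ^ 6 ||| 2 ^ 7 ||| 2 ^ 25 ||| 2 ^ 26 ||| 2 ^ 27 ||| 2 ^ 28 ||| 2 ^ 29 ||| 2 ^ 30 ||| 2 ^ 31) := by
    decide
  apply Nat.eq_of_testBit_eq; intro j
  rw [hm]
  simp only [Nat.testBit_land, Nat.testBit_lor, pv_tb_mul_pow, Nat.testBit_two_pow]
  by_cases h5 : j = 5; · subst h5; simp
  by_cases h6 : j = 6; · subst h6; simp
  by_cases h7 : j = 7; · subst h7; simp
  by_cases h25 : j = 25; · subst h25; simp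
  by_cases h26 : j = 26; · subst h26; simp
  by_cases h27 : j = 27; · subst h27; simp
  by_cases h28 : j = 28; · subst h28; simp
  by_cases h29 : j = 29; · subst h29; simp
  by_cases h30 : j = 30; · subst h30; simp
  by_cases h31 : j = 31; · subst h31; simp
  simp [h5, h6, h7, h25, h26, h27, h28, h29, h30, h31, Ne.symm]

-- ===== VERDICT (by name: the statement is the Claim_ definition above) =====
theorem parse_section_characteristics_py_spec : Claim_equal_parse_section_characteristics_py := by
  intro chars _
  unfold Spec_parse_section_characteristics_py
  have h5 := pv_band_flag chars 5 (by norm_num)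
  have h6 := pv_band_flag chars 6 (by norm_num)
  have h7 := pv_band_flag chars 7 (by norm_num)
  have h25 := pv_band_flag chars 25 (by norm_num)
  have h26 := pv_band_flag chars 26 (by norm_num)
  have h27 := pv_band_flag chars 27 (by norm_num)
  have h28 := pv_band_flag chars 28 (by norm_num)
  have h29 := pv_band_flag chars 29 (by norm_num)
  have h30 := pv_band_flag chars 30 (by norm_num)
  have h31 := pv_band_flag chars 31 (by norm_num)
  norm_num at h5 h6 h7 h25 h26 h27 h28 h29 h30 h31
  have hM := pv_band_emod32 chars 0xFE0000E0 (by norm_num) (by norm_num)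
  rw [show Int.toNat 4261413088 = 4261413088 from rfl, pv_and_mask] at hM
  norm_num at hM
  simp only [parse_section_characteristics_py, parse_section_characteristics_py_alt]
  rw [show charMapA.items =
    [((32 : Int), "CODE"), (64, "INITIALIZED_DATA"), (128, "UNINITIALIZED_DATA"),
     (33554432, "DISCARDABLE"), (67108864, "NOT_CACHED"), (134217728, "NOT_PAGED"),
     (268435456, "SHARED"), (536870912, "EXECUTE"), (1073741824, "READ"),
     (2147483648, "WRITE")] from rfl]
  simp only [List.foldl_cons, List.foldl_nil]
  rw [hM, h5, h6, h7, h25, h26, h27, h28, h29, h30, h31]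
  generalize (chars % 4294967296).toNat.testBit 5 = t5
  generalize (chars % 4294967296).toNat.testBit 6 = t6
  generalize (chars % 4294967296).toNat.testBit 7 = t7
  generalize (chars % 4294967296).toNat.testBit 25 = t25
  generalize (chars % 4294967296).toNat.testBit 26 = t26
  generalize (chars % 4294967296).toNat.testBit 27 = t27
  generalize (chars % 4294967296).toNat.testBit 28 = t28
  generalize (chars % 4294967296).toNat.testBit 29 = t29
  generalize (chars % 4294967296).toNat.testBit 30 = t30
  generalize (chars % 4294967296).toNat.testBit 31 = t31
  revert t5 t6 t7 t25 t26 t27 t28 t29 t30 t31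
  decide
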